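-- pv_equiv track=rewrite | github.com/hussainweb/logseq-to-obsidian | src/logseq_converter/utils.py | is_markdown_empty
-- ===== SOURCE A (Python) =====
-- def is_markdown_empty(content: str) -> bool:
--     """
--     Checks if markdown content is empty or nearly-empty.
--     Removes frontmatter, then checks if remaining content only has hyphens/whitespace.
--     """
--     if not content or not content.strip():
--         return True
--
--     lines = content.split("\n")
--
--     # Skip frontmatter if present
--     start_idx = 0
--     if lines and lines[0].strip() == "---":
--         # Find closing ---
--         for i in range(1, len(lines)):
--             if lines[i].strip() == "---":
--                 start_idx = i + 1
--                 break
--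
--     # Get content after frontmatter
--     body_content = "\n".join(lines[start_idx:])
--
--     # Remove characters we want to ignore
--     cleaned = (
--         body_content.replace("-", "")
--         .replace("\n", "")
--         .replace(" ", "")
--         .replace("\t", "")
--     )
--     return len(cleaned) == 0
-- ===== SOURCE B (Python) =====
-- def is_markdown_empty(content: str) -> bool:
--     """
--     One fused pass over the lines with a small state machine: accumulate
--     whether a non-ignorable character was seen, and forget everything seen
--     so far when the frontmatter's closing fence arrives.  No staged
--     find-the-index pass and no join/replace rebuilding.
--     """
--     if not content or not content.strip():
--         return True
--
--     open_fm = False   # inside a frontmatter block that is still unclosed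
--     bad = False       # a non-ignorable character seen in the candidate body
--     first = True
--     for line in content.split("\n"):
--         is_fence = line.strip() == "---"
--         if first:
--             first = False
--             open_fm = is_fence
--         elif open_fm and is_fence:
--             # closing fence: everything so far was frontmatter, forget it
--             open_fm = False
--             bad = False
--             continue
--         if any(c not in "- \t" for c in line):
--             bad = True
--     return not bad
-- ===== Notes on version B (the rewrite author's own statement) =====
-- stated objective: alternative
-- what changed: Replaces A's staged pipeline (scan for the closing-fence index, join the remaining lines, four chained replace passes, length check) by one fused pass over the lines with a state machine that accumulates a flag recording that a non-ignorable character occurred and resets it when the frontmatter's closing fence is reached, so no index, no string rebuilding and no second pass exist.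
import Mathlib
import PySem

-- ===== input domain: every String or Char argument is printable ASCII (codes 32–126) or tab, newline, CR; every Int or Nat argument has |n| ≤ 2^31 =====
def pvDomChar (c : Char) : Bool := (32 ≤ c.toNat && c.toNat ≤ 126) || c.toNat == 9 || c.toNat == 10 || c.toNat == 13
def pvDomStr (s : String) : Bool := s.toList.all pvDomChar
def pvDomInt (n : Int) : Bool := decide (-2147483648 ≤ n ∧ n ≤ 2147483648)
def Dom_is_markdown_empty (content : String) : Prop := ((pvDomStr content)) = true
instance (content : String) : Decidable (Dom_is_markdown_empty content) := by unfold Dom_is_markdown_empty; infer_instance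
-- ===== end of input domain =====

-- B replaces A's staged pipeline (find the closing-fence index, join the suffix, four
-- replace passes, length check) by ONE fused pass over the lines with a state machine
-- whose 'bad' accumulator is reset at the closing fence (objective: alternative).

-- ===== PORT A =====
-- A's frontmatter scan: for i in range(1, len(lines)): if lines[i].strip() == "---": start_idx = i + 1; break
def pvScanA (i : Nat) (rest : List (List Char)) : Nat :=
  match rest with
  | [] => 0
  | l :: t => if PySem.Chars.strip l = ['-', '-', '-'] then i + 1 else pvScanA (i + 1) t

def is_markdown_empty (content : String) : Bool :=
  let cs := content.toList
  if cs.isEmpty || (PySem.Chars.strip cs).isEmpty then true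
  else
    let lines := PySem.Chars.splitOn cs ['\n']
    let start_idx :=
      match lines with
      | [] => 0
      | l0 :: rest => if PySem.Chars.strip l0 = ['-', '-', '-'] then pvScanA 1 rest else 0
    let body := PySem.Chars.join ['\n'] (lines.drop start_idx)
    let cleaned :=
      PySem.Chars.replace
        (PySem.Chars.replace (PySem.Chars.replace (PySem.Chars.replace body ['-'] []) ['\n'] []) [' '] [])
        ['\t'] []
    cleaned.length == 0

-- ===== PORT B =====
-- any(c not in "- \t" for c in line)
def pvLineBad (l : List Char) : Bool := l.any (fun c => !(['-', ' ', '\t'].contains c))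

-- Source B's single loop: state = (first, open_fm, bad)
def pvLoopB (lines : List (List Char)) (first openFm bad : Bool) : Bool :=
  match lines with
  | [] => bad
  | l :: t =>
    let fence := PySem.Chars.strip l = ['-', '-', '-']
    if first then
      pvLoopB t false (if fence then true else false) (bad || pvLineBad l)
    else if openFm && fence then
      pvLoopB t false false false
    else
      pvLoopB t false openFm (bad || pvLineBad l)

def is_markdown_empty_alt (content : String) : Bool :=
  let cs := content.toList
  if cs.isEmpty || (PySem.Chars.strip cs).isEmpty then true
  else !(pvLoopB (PySem.Chars.splitOn cs ['\n']) true false false)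

-- ===== PRECONDITION & SPEC =====
def Spec_is_markdown_empty (content : String) (out : Bool) : Prop := out = is_markdown_empty_alt content
instance (content : String) (out : Bool) : Decidable (Spec_is_markdown_empty content out) := by unfold Spec_is_markdown_empty; infer_instance

-- ===== CLAIM (what is proved, stated in full; the proofs are below) =====
def Claim_equal_is_markdown_empty : Prop := ∀ (content : String), Dom_is_markdown_empty content → Spec_is_markdown_empty content (is_markdown_empty content)

-- ===== LEMMAS AND PROOFS =====

-- replace s [c] "" removes exactly the occurrences of c
theorem pvReplaceGo_filter (c : Char) (fuel : Nat) (l acc : List Char) (h : l.length ≤ fuel) :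
    PySem.Chars.replace.go [c] [] fuel l acc = acc.reverse ++ l.filter (· ≠ c) := by
  induction fuel generalizing l acc with
  | zero =>
    have : l = [] := List.eq_nil_of_length_eq_zero (Nat.le_zero.mp h)
    subst this
    simp [PySem.Chars.replace.go]
  | succ fuel ih =>
    cases l with
    | nil => simp [PySem.Chars.replace.go]
    | cons x t =>
      simp only [PySem.Chars.replace.go]
      by_cases hx : x = c
      · subst hx
        have hp : [x].isPrefixOf (x :: t) = true := by simp [List.isPrefixOf]
        rw [if_pos hp]
        have := ih t acc (by simpa using Nat.lt_succ_iff.mp (by simpa using h))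
        simpa [List.filter] using this
      · have hp : [c].isPrefixOf (x :: t) = false := by
          simp [List.isPrefixOf]
          exact fun hcx => (hx hcx.symm).elim
        rw [if_neg (by simp [hp])]
        have := ih t (x :: acc) (by simpa using Nat.lt_succ_iff.mp (by simpa using h))
        simpa [List.filter, hx] using this

theorem pvReplace_filter (c : Char) (s : List Char) :
    PySem.Chars.replace s [c] [] = s.filter (· ≠ c) := by
  simp only [PySem.Chars.replace, List.isEmpty_cons]
  simpa using pvReplaceGo_filter c s.length s [] (le_refl _)

-- no piece produced by split("\n") contains '\n'
theorem pvSplitGo_no_nl (fuel : Nat) (l cur : List Char) (acc : List (List Char))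
    (hf : l.length ≤ fuel) (hc : '\n' ∉ cur) (ha : ∀ m ∈ acc, '\n' ∉ m) :
    ∀ m ∈ PySem.Chars.splitOn.go ['\n'] fuel l cur acc, '\n' ∉ m := by
  induction fuel generalizing l cur acc with
  | zero =>
    have : l = [] := List.eq_nil_of_length_eq_zero (Nat.le_zero.mp hf)
    subst this
    intro m hm
    simp only [PySem.Chars.splitOn.go, List.mem_reverse, List.mem_cons] at hm
    rcases hm with hm | hm
    · subst hm; simpa using hc
    · exact ha m hm
  | succ fuel ih =>
    cases l with
    | nil =>
      intro m hm
      simp only [PySem.Chars.splitOn.go, List.mem_reverse, List.mem_cons] at hm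
      rcases hm with hm | hm
      · subst hm; simpa using hc
      · exact ha m hm
    | cons x t =>
      simp only [PySem.Chars.splitOn.go]
      by_cases hx : x = '\n'
      · subst hx
        have hp : ['\n'].isPrefixOf ('\n' :: t) = true := by simp [List.isPrefixOf]
        rw [if_pos hp]
        refine ih t [] (cur.reverse :: acc) (by simpa using Nat.lt_succ_iff.mp (by simpa using hf)) (by simp) ?_
        intro m hm
        rcases List.mem_cons.mp hm with hm | hm
        · subst hm; simpa using hc
        · exact ha m hm
      · have hp : ['\n'].isPrefixOf (x :: t) = false := by
          simp [List.isPrefixOf]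
          exact fun hcx => (hx hcx.symm).elim
        rw [if_neg (by simp [hp])]
        refine ih t (x :: cur) acc (by simpa using Nat.lt_succ_iff.mp (by simpa using hf)) ?_ ha
        intro hm
        rcases List.mem_cons.mp hm with hm | hm
        · exact hx hm.symm
        · exact hc hm

theorem pvSplitOn_no_nl (s : List Char) :
    ∀ m ∈ PySem.Chars.splitOn s ['\n'], '\n' ∉ m := by
  refine pvSplitGo_no_nl (s.length + 1) s [] [] (by omega) (by simp) (by simp)

-- all over an intercalation whose separator is allowed
theorem pvAll_join (p : Char → Bool) (hp : p '\n' = true) (parts : List (List Char)) :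
    (PySem.Chars.join ['\n'] parts).all p = parts.all (fun l => l.all p) := by
  induction parts with
  | nil => simp [PySem.Chars.join, List.intercalate]
  | cons a rest ih =>
    cases rest with
    | nil => simp [PySem.Chars.join, List.intercalate]
    | cons b t =>
      have hstep : PySem.Chars.join ['\n'] (a :: b :: t) = a ++ '\n' :: PySem.Chars.join ['\n'] (b :: t) := by
        simp [PySem.Chars.join, List.intercalate, List.intersperse]
      rw [hstep]
      simp only [List.all_append, List.all_cons, hp, Bool.true_and, ih, List.all_cons]

-- mem-restricted congruence for List.all (Bool form)
theorem pvAllCongr {α : Type} (xs : List α) (p q : α → Bool) (h : ∀ a ∈ xs, p a = q a) :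
    xs.all p = xs.all q := by
  induction xs with
  | nil => rfl
  | cons a t ih =>
    simp only [List.all_cons, h a (by simp), ih (fun b hb => h b (by simp [hb]))]

-- A's whole tail computation: replace-chain emptiness equals a membership test on the dropped suffix
theorem pvTail (lines : List (List Char)) (hno : ∀ m ∈ lines, '\n' ∉ m) (k : Nat) :
    ((PySem.Chars.replace
        (PySem.Chars.replace (PySem.Chars.replace
          (PySem.Chars.replace (PySem.Chars.join ['\n'] (lines.drop k)) ['-'] []) ['\n'] []) [' '] [])
        ['\t'] []).length == 0)
      = (lines.drop k).all (fun line => line.all (fun ch => ['-', ' ', '\t'].contains ch)) := by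
  have hrep :
      PySem.Chars.replace
        (PySem.Chars.replace (PySem.Chars.replace
          (PySem.Chars.replace (PySem.Chars.join ['\n'] (lines.drop k)) ['-'] []) ['\n'] []) [' '] [])
        ['\t'] []
      = (PySem.Chars.join ['\n'] (lines.drop k)).filter
          (fun c => !(c == '-' || c == '\n' || c == ' ' || c == '\t')) := by
    rw [pvReplace_filter, pvReplace_filter, pvReplace_filter, pvReplace_filter]
    rw [List.filter_filter, List.filter_filter, List.filter_filter]
    apply List.filter_congr
    intro c _
    cases Decidable.em (c = '-') <;> cases Decidable.em (c = '\n') <;>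
      cases Decidable.em (c = ' ') <;> cases Decidable.em (c = '\t') <;> simp_all
  rw [hrep]
  have hlen : ∀ (xs : List Char) (p : Char → Bool),
      ((xs.filter (fun c => !(p c))).length == 0) = xs.all p := by
    intro xs p
    induction xs with
    | nil => simp
    | cons x t ih => by_cases hx : p x <;> simp [List.filter, hx, ih]
  rw [hlen _ (fun c => c == '-' || c == '\n' || c == ' ' || c == '\t')]
  rw [pvAll_join _ (by simp) (lines.drop k)]
  apply pvAllCongr
  intro l hl
  have hlnl : '\n' ∉ l := hno l (List.mem_of_mem_drop hl)
  apply pvAllCongr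
  intro c hc
  have hcnl : c ≠ '\n' := fun h => hlnl (h ▸ hc)
  have h2 : (c == '\n') = false := beq_eq_false_iff_ne.mpr hcnl
  simp only [List.contains_cons, List.contains_nil, Bool.or_false, Bool.or_assoc, h2]

-- a bad line is exactly a non-OK line
theorem pvLineBad_not_all (l : List Char) :
    pvLineBad l = !(l.all (fun ch => ['-', ' ', '\t'].contains ch)) := by
  simp [pvLineBad, List.all_eq_not_any_not]

theorem pvAny_bad (xs : List (List Char)) :
    xs.any pvLineBad = !(xs.all (fun line => line.all (fun ch => ['-', ' ', '\t'].contains ch))) := by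
  induction xs with
  | nil => rfl
  | cons a t ih => simp [List.any_cons, List.all_cons, pvLineBad_not_all, ih]

-- B's loop once the frontmatter state is settled closed: pure accumulation
theorem pvLoopB_closed (xs : List (List Char)) (bad : Bool) :
    pvLoopB xs false false bad = (bad || xs.any pvLineBad) := by
  induction xs generalizing bad with
  | nil => simp [pvLoopB]
  | cons l t ih =>
    by_cases hf : PySem.Chars.strip l = ['-', '-', '-'] <;>
      simp [pvLoopB, hf, ih, List.any_cons, Bool.or_assoc]

-- A's scan result is 0 or at least i+1
theorem pvScanA_zero_or_ge (i : Nat) (rest : List (List Char)) :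
    pvScanA i rest = 0 ∨ i + 1 ≤ pvScanA i rest := by
  induction rest generalizing i with
  | nil => exact Or.inl rfl
  | cons l t ih =>
    simp only [pvScanA]
    by_cases hf : PySem.Chars.strip l = ['-', '-', '-']
    · exact Or.inr (by simp [hf])
    · rw [if_neg hf]
      rcases ih (i + 1) with h | h
      · exact Or.inl h
      · exact Or.inr (by omega)

-- B's loop in the open-frontmatter state, related to A's closing-fence scan
theorem pvLoopB_open (rest : List (List Char)) (i : Nat) (bad : Bool) :
    pvLoopB rest false true bad =
      (if pvScanA i rest = 0 then bad || rest.any pvLineBad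
       else (rest.drop (pvScanA i rest - i)).any pvLineBad) := by
  induction rest generalizing i bad with
  | nil => simp [pvLoopB, pvScanA]
  | cons l t ih =>
    by_cases hf : PySem.Chars.strip l = ['-', '-', '-']
    · have hs : pvScanA i (l :: t) = i + 1 := by simp [pvScanA, hf]
      have hstep : pvLoopB (l :: t) false true bad = pvLoopB t false false false := by
        simp [pvLoopB, hf]
      rw [hs, hstep, pvLoopB_closed, if_neg (by omega : ¬ i + 1 = 0)]
      have h1 : i + 1 - i = 1 := by omega
      rw [h1]
      simp
    · have hs : pvScanA i (l :: t) = pvScanA (i + 1) t := by simp [pvScanA, hf]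
      have hstep : pvLoopB (l :: t) false true bad = pvLoopB t false true (bad || pvLineBad l) := by
        simp [pvLoopB, hf]
      rw [hs, hstep, ih (i + 1) (bad || pvLineBad l)]
      rcases pvScanA_zero_or_ge (i + 1) t with h0 | hge
      · simp [h0, List.any_cons, Bool.or_assoc]
      · have hne : pvScanA (i + 1) t ≠ 0 := by omega
        rw [if_neg hne, if_neg hne]
        have hd : pvScanA (i + 1) t - i = (pvScanA (i + 1) t - (i + 1)) + 1 := by omega
        rw [hd, List.drop_succ_cons]

-- ===== VERDICT (by name: the statement is the Claim_ definition above) =====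
theorem is_markdown_empty_spec : Claim_equal_is_markdown_empty := by
  intro content _
  unfold Spec_is_markdown_empty is_markdown_empty is_markdown_empty_alt
  by_cases hg : content.toList.isEmpty || (PySem.Chars.strip content.toList).isEmpty
  · rw [if_pos hg, if_pos hg]
  · rw [if_neg hg, if_neg hg]
    have hno := pvSplitOn_no_nl content.toList
    generalize hE : PySem.Chars.splitOn content.toList ['\n'] = lines
    rw [hE] at hno
    cases lines with
    | nil => decide
    | cons l0 rest =>
      simp only [pvLoopB]
      by_cases h0 : PySem.Chars.strip l0 = ['-', '-', '-']
      · simp only [if_pos h0]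
        rw [pvTail (l0 :: rest) hno (pvScanA 1 rest)]
        rw [pvLoopB_open rest 1 (false || pvLineBad l0)]
        rcases pvScanA_zero_or_ge 1 rest with hz | hge
        · rw [if_pos hz, hz]
          simp [pvAny_bad, pvLineBad_not_all, List.all_cons]
        · have hne : pvScanA 1 rest ≠ 0 := by omega
          rw [if_neg hne]
          have : pvScanA 1 rest = (pvScanA 1 rest - 1) + 1 := by omega
          rw [this, List.drop_succ_cons, pvAny_bad]
          simp
      · simp only [if_neg h0]
        rw [pvTail (l0 :: rest) hno 0, pvLoopB_closed]
        simp [pvAny_bad, pvLineBad_not_all, List.all_cons]
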